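-- pv_equiv track=rewrite | github.com/luckydimdim/grokking | subsets/unique_generalized_abbreviations/main.py | bamba
-- ===== SOURCE A (Python) =====
-- def bamba(word):
--     left, right = 0, 0
--     counter = 0
--     result = word
--
--     while right < len(word):
--         if word[right] == '_':
--             counter += 1
--             ll = list(word)
--             ll[left] = str(counter)
--             result = ''.join(ll)
--         else:
--             counter = 0
--             left = right + 1
--         right += 1
--
--     return result.replace('_', '')
-- ===== SOURCE B (Python) =====
-- def bamba(word):
--     rev = word[::-1]
--     n = len(rev)
--     i = 0
--     while i < n and rev[i] != '_':
--         i += 1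
--     if i == n:
--         return word
--     j = i
--     while j < n and rev[j] == '_':
--         j += 1
--     return rev[j:][::-1].replace('_', '') + str(j - i) + rev[:i][::-1]
-- ===== Notes on version B (the rewrite author's own statement) =====
-- stated objective: faster
-- what changed: A scans left-to-right and rebuilds the whole string (list(word), join) at every underscore; B locates the final underscore run by one scan of the reversed string and assembles the result once from three slices.
import Mathlib
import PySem

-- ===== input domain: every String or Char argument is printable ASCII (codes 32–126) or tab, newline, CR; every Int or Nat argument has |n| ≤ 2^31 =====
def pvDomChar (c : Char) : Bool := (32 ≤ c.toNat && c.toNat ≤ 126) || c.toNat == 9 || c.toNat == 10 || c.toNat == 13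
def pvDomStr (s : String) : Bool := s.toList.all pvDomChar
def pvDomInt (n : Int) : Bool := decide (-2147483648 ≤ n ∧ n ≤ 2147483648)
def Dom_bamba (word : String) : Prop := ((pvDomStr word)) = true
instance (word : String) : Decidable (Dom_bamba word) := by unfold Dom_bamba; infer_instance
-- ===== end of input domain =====

-- B rewrites A's left-to-right index loop (which rebuilds the whole string at every underscore) as a
-- right-to-left locate of the final underscore run followed by one assembly; objective: alternative/faster scan.

-- ===== PORT A =====
-- the while loop: `rest` is word[right:], so the head of `rest` is word[right];
-- `ll = list(word); ll[left] = str(counter); result = ''.join(ll)` is the set-then-flatten below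
-- (whenever this branch runs, left ≤ right < len(word), so the assignment is in range);
-- the `[]` case is the final `return result.replace('_','')`.
def bambaGo (w : List Char) : List Char → Nat → Nat → Int → List Char → List Char
  | [], _, _, _, result => PySem.Chars.replace result ['_'] []
  | c :: rest, right, left, counter, result =>
    if c = '_' then
      bambaGo w rest (right + 1) left (counter + 1)
        (((w.map (fun ch => [ch])).set left (PySem.Int.toChars (counter + 1))).flatten)
    else
      bambaGo w rest (right + 1) (right + 1) 0 result

def bamba (word : String) : String :=
  String.ofList (bambaGo word.toList word.toList 0 0 0 word.toList)

-- ===== PORT B =====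
-- each `while i < n and <test on rev[i]>: i += 1` scan of Source B is spanLen of the test over the rest of rev
def spanLen (p : Char → Bool) : List Char → Nat
  | [] => 0
  | c :: cs => if p c then spanLen p cs + 1 else 0

def bamba_alt (word : String) : String :=
  let rev := word.toList.reverse            -- rev = word[::-1]
  let n := rev.length
  let i := spanLen (fun c => !(c == '_')) rev
  if i = n then word
  else
    let j := i + spanLen (fun c => c == '_') (rev.drop i)
    String.ofList (PySem.Chars.replace (rev.drop j).reverse ['_'] []   -- rev[j:][::-1].replace('_','')
      ++ PySem.Int.toChars ((j : Int) - (i : Int))                     -- str(j - i)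
      ++ (rev.take i).reverse)                                         -- rev[:i][::-1]

-- ===== PRECONDITION & SPEC =====
def Spec_bamba (word : String) (out : String) : Prop := out = bamba_alt word
instance (word : String) (out : String) : Decidable (Spec_bamba word out) := by unfold Spec_bamba; infer_instance

-- ===== CLAIM (what is proved, stated in full; the proofs are below) =====
def Claim_equal_bamba : Prop := ∀ (word : String), Dom_bamba word → Spec_bamba word (bamba word)

-- ===== LEMMAS AND PROOFS =====

theorem bambaGo_cons (w : List Char) (c : Char) (rest : List Char) (right left : Nat)
    (counter : Int) (result : List Char) :
    bambaGo w (c :: rest) right left counter result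
      = if c = '_' then
          bambaGo w rest (right + 1) left (counter + 1)
            (((w.map (fun ch => [ch])).set left (PySem.Int.toChars (counter + 1))).flatten)
        else bambaGo w rest (right + 1) (right + 1) 0 result := rfl

theorem flatten_singletons : ∀ l : List Char, (l.map (fun c => [c])).flatten = l := by
  intro l
  induction l with
  | nil => rfl
  | cons a t ih => simp [ih]

theorem digitChar_ne_us (m : Nat) : Nat.digitChar m ≠ '_' := by
  by_cases h : m < 16
  · interval_cases m <;> decide
  · have h2 : Nat.digitChar m = '*' := by
      simp only [Nat.digitChar]
      repeat rw [if_neg (by omega)]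
    rw [h2]; decide

theorem toDigitsCore_no_us : ∀ (fuel n : Nat) (ds : List Char), '_' ∉ ds →
    '_' ∉ Nat.toDigitsCore 10 fuel n ds := by
  intro fuel
  induction fuel with
  | zero => intro n ds h; simpa [Nat.toDigitsCore] using h
  | succ fuel ih =>
    intro n ds h
    simp only [Nat.toDigitsCore]
    split
    · intro hmem
      rcases List.mem_cons.mp hmem with h1 | h1
      · exact digitChar_ne_us _ h1.symm
      · exact h h1
    · exact ih _ _ (by
        intro hmem
        rcases List.mem_cons.mp hmem with h1 | h1
        · exact digitChar_ne_us _ h1.symm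
        · exact h h1)

theorem toChars_no_us (n : Nat) : '_' ∉ PySem.Int.toChars (n : Int) := by
  simp only [PySem.Int.toChars]
  rw [if_neg (by omega)]
  simpa using toDigitsCore_no_us (n + 1) n []

theorem replace_go_eq : ∀ (fuel : Nat) (l acc : List Char), l.length ≤ fuel →
    PySem.Chars.replace.go ['_'] [] fuel l acc = acc.reverse ++ l.filter (fun c => !(c == '_')) := by
  intro fuel
  induction fuel with
  | zero =>
    intro l acc h
    have : l = [] := List.eq_nil_of_length_eq_zero (by omega)
    subst this; simp [PySem.Chars.replace.go]
  | succ fuel ih =>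
    intro l acc h
    cases l with
    | nil => simp [PySem.Chars.replace.go]
    | cons c t =>
      simp only [PySem.Chars.replace.go]
      by_cases hc : c = '_'
      · subst hc
        rw [if_pos (by simp [List.isPrefixOf])]
        rw [show List.drop (['_'].length) ('_' :: t) = t from rfl,
          show ([] : List Char).reverse ++ acc = acc by simp]
        rw [ih t acc (by simpa using h)]
        simp
      · have hpre : (['_'].isPrefixOf (c :: t)) = false := by
          simp [List.isPrefixOf]
          exact Ne.symm hc
        rw [if_neg (by simp [hpre])]
        rw [ih t (c :: acc) (by simpa using h)]
        simp [hc]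

theorem replace_eq_filter (cs : List Char) :
    PySem.Chars.replace cs ['_'] [] = cs.filter (fun c => !(c == '_')) := by
  simp only [PySem.Chars.replace]
  rw [if_neg (by simp)]
  simpa using replace_go_eq cs.length cs []

theorem spanLen_eq_takeWhile (p : Char → Bool) : ∀ cs : List Char,
    spanLen p cs = (cs.takeWhile p).length := by
  intro cs
  induction cs with
  | nil => rfl
  | cons c t ih =>
    simp only [spanLen, List.takeWhile]
    by_cases h : p c <;> simp [h, ih]

theorem go_no_us (w : List Char) : ∀ (rest : List Char), '_' ∉ rest →
    ∀ (right left : Nat) (counter : Int) (result : List Char),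
    bambaGo w rest right left counter result = PySem.Chars.replace result ['_'] [] := by
  intro rest
  induction rest with
  | nil => intro _ right left counter result; rfl
  | cons c t ih =>
    intro h right left counter result
    have hc : ¬ c = '_' := fun hc => h (by simp [hc])
    rw [bambaGo_cons, if_neg hc]
    exact ih (fun hm => h (by simp [hm])) _ _ _ _

theorem go_run (w t : List Char) (ht : '_' ∉ t) : ∀ (run : List Char), run ≠ [] →
    (∀ c ∈ run, c = '_') → ∀ (right left : Nat) (counter : Int) (result : List Char),
    bambaGo w (run ++ t) right left counter result
      = PySem.Chars.replace
          (((w.map (fun ch => [ch])).set left (PySem.Int.toChars (counter + run.length))).flatten)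
          ['_'] [] := by
  intro run
  induction run with
  | nil => intro h; exact absurd rfl h
  | cons c run' ih =>
    intro _ hall right left counter result
    have hc : c = '_' := hall c (by simp)
    rw [List.cons_append, bambaGo_cons, if_pos hc]
    cases run' with
    | nil =>
      rw [List.nil_append, go_no_us w t ht]
      norm_num
    | cons c2 run'' =>
      rw [ih (by simp) (fun x hx => hall x (by simp [hx])) (right + 1) left (counter + 1) _]
      rw [show counter + 1 + (((c2 :: run'').length : Nat) : Int)
            = counter + (((c :: c2 :: run'').length : Nat) : Int) by push_cast [List.length_cons]; ring]

theorem go_pre (w t : List Char) (ht : '_' ∉ t) (run : List Char) (hrn : run ≠ [])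
    (hall : ∀ c ∈ run, c = '_') : ∀ (p : List Char), p ≠ [] → p.getLast? ≠ some '_' →
    ∀ (right left : Nat) (counter : Int) (result : List Char),
    bambaGo w (p ++ (run ++ t)) right left counter result
      = PySem.Chars.replace
          (((w.map (fun ch => [ch])).set (right + p.length) (PySem.Int.toChars (run.length))).flatten)
          ['_'] [] := by
  intro p
  induction p with
  | nil => intro h; exact absurd rfl h
  | cons x p' ih =>
    intro _ hlast right left counter result
    cases p' with
    | nil =>
      have hx : ¬ x = '_' := by
        intro hx; exact hlast (by simp [hx])
      rw [List.cons_append, List.nil_append, bambaGo_cons, if_neg hx]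
      rw [go_run w t ht run hrn hall (right + 1) (right + 1) 0 result]
      norm_num
    | cons y p'' =>
      have hlast' : (y :: p'').getLast? ≠ some '_' := by
        rwa [List.getLast?_cons_cons] at hlast
      have hlen : right + 1 + (y :: p'').length = right + (x :: y :: p'').length := by
        simp; omega
      by_cases hx : x = '_'
      · rw [List.cons_append, bambaGo_cons, if_pos hx]
        rw [ih (by simp) hlast' (right + 1) left (counter + 1) _, hlen]
      · rw [List.cons_append, bambaGo_cons, if_neg hx]
        rw [ih (by simp) hlast' (right + 1) (right + 1) 0 result, hlen]

theorem flatten_set (p run t v : List Char) (h : run ≠ []) :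
    (((p ++ run ++ t).map (fun ch => [ch])).set p.length v).flatten
      = p ++ v ++ run.tail ++ t := by
  cases run with
  | nil => exact absurd rfl h
  | cons r0 run' =>
    have heq : ((p ++ (r0 :: run') ++ t).map (fun ch => [ch]))
        = (p.map (fun ch => [ch])) ++ ([r0] :: ((run' ++ t).map (fun ch => [ch]))) := by
      simp
    rw [heq, List.set_append_right _ _ (by simp)]
    simp only [List.length_map, Nat.sub_self, List.set_cons_zero]
    rw [List.flatten_append]
    simp [flatten_singletons]

theorem filter_final (pfx run t : List Char) (k : Nat) (hall : ∀ c ∈ run, c = '_')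
    (ht : '_' ∉ t) :
    (pfx ++ PySem.Int.toChars (k : Int) ++ run.tail ++ t).filter (fun c => !(c == '_'))
      = pfx.filter (fun c => !(c == '_')) ++ PySem.Int.toChars (k : Int) ++ t := by
  have h1 : (PySem.Int.toChars (k : Int)).filter (fun c => !(c == '_'))
      = PySem.Int.toChars (k : Int) := by
    rw [List.filter_eq_self]
    intro a ha
    simp only [Bool.not_eq_eq_eq_not, Bool.not_true, beq_eq_false_iff_ne]
    intro h
    exact toChars_no_us k (h ▸ ha)
  have h2 : run.tail.filter (fun c => !(c == '_')) = [] := by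
    rw [List.filter_eq_nil_iff]
    intro a ha
    have : a = '_' := hall a (List.mem_of_mem_tail ha)
    simp [this]
  have h3 : t.filter (fun c => !(c == '_')) = t := by
    rw [List.filter_eq_self]
    intro a ha
    simp only [Bool.not_eq_eq_eq_not, Bool.not_true, beq_eq_false_iff_ne]
    intro h
    exact ht (h ▸ ha)
  simp only [List.filter_append, h1, h2, h3]
  simp

theorem A_val (w T R P : List Char) (hw : w = P.reverse ++ (R.reverse ++ T.reverse))
    (hT : '_' ∉ T) (hRall : ∀ c ∈ R, c = '_') (hRne : R ≠ [])
    (hPh : P = [] ∨ (P ≠ [] ∧ P.head? ≠ some '_')) :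
    bambaGo w w 0 0 0 w
      = P.reverse.filter (fun c => !(c == '_')) ++ PySem.Int.toChars ((R.length : Nat) : Int)
        ++ T.reverse := by
  have ht : '_' ∉ T.reverse := by simpa using hT
  have hrne : R.reverse ≠ [] := by simpa using hRne
  have hrall : ∀ c ∈ R.reverse, c = '_' := fun c hc => hRall c (List.mem_reverse.mp hc)
  subst hw
  rcases hPh with hP | ⟨hPne, hP⟩
  · subst hP
    simp only [List.reverse_nil, List.nil_append]
    rw [go_run (R.reverse ++ T.reverse) T.reverse ht R.reverse hrne hrall 0 0 0 _]
    have hfs := flatten_set [] R.reverse T.reverse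
      (PySem.Int.toChars (0 + ((R.reverse.length : Nat) : Int))) hrne
    simp only [List.nil_append, List.length_nil] at hfs
    rw [hfs, replace_eq_filter]
    have hff := filter_final [] R.reverse T.reverse R.length hrall ht
    simp only [List.nil_append] at hff
    rw [show (0 : Int) + ((R.reverse.length : Nat) : Int) = ((R.length : Nat) : Int) by simp]
    rw [hff]
  · have hpne : P.reverse ≠ [] := by simpa using hPne
    have hplast : P.reverse.getLast? ≠ some '_' := by
      rw [List.getLast?_reverse]; exact hP
    rw [go_pre (P.reverse ++ (R.reverse ++ T.reverse)) T.reverse ht R.reverse hrne hrall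
      P.reverse hpne hplast 0 0 0 _]
    have hfs := flatten_set P.reverse R.reverse T.reverse
      (PySem.Int.toChars ((R.reverse.length : Nat) : Int)) hrne
    rw [show P.reverse ++ (R.reverse ++ T.reverse) = P.reverse ++ R.reverse ++ T.reverse by
      rw [List.append_assoc]]
    rw [show (0 : Nat) + P.reverse.length = P.reverse.length by omega, hfs, replace_eq_filter]
    rw [show ((R.reverse.length : Nat) : Int) = ((R.length : Nat) : Int) by simp]
    rw [filter_final P.reverse R.reverse T.reverse R.length hrall ht]

theorem takeWhile_append_stop (p : Char → Bool) : ∀ (T rest : List Char),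
    (∀ c ∈ T, p c = true) → (∀ a tl, rest = a :: tl → p a = false) →
    (T ++ rest).takeWhile p = T := by
  intro T
  induction T with
  | nil =>
    intro rest _ hstop
    cases rest with
    | nil => rfl
    | cons a tl => simpa using List.takeWhile_cons_of_neg (l := tl) (by simp [hstop a tl rfl])
  | cons x T' ih =>
    intro rest hT hstop
    rw [List.cons_append, List.takeWhile_cons_of_pos (hT x (by simp))]
    rw [ih rest (fun c hc => hT c (by simp [hc])) hstop]

theorem both_eq (word : String) (T R P : List Char)
    (hsplit : word.toList.reverse = T ++ (R ++ P))
    (hT : '_' ∉ T) (hRne : R ≠ []) (hRall : ∀ c ∈ R, c = '_')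
    (hPh : P = [] ∨ (P ≠ [] ∧ P.head? ≠ some '_')) :
    bamba word = bamba_alt word := by
  have hw : word.toList = P.reverse ++ (R.reverse ++ T.reverse) := by
    have h2 := congrArg List.reverse hsplit
    simpa [List.reverse_append, List.append_assoc] using h2
  simp only [bamba, bamba_alt]
  rw [A_val word.toList T R P hw hT hRall hRne hPh]
  simp only [spanLen_eq_takeWhile]
  rw [hsplit]
  have htw1 : (T ++ (R ++ P)).takeWhile (fun c => !(c == '_')) = T := by
    refine takeWhile_append_stop _ T (R ++ P) ?_ ?_
    · intro c hc
      simp only [Bool.not_eq_eq_eq_not, Bool.not_true, beq_eq_false_iff_ne]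
      intro h
      exact hT (h ▸ hc)
    · intro a tl h
      have ha : a ∈ R ++ P := by rw [h]; simp
      obtain ⟨r0, R', hRe⟩ := List.exists_cons_of_ne_nil hRne
      have : a = r0 := by
        rw [hRe] at h
        exact (by simpa using congrArg List.head? h : r0 = a).symm
      rw [this, hRall r0 (by simp [hRe])]
      simp
  have hif : ¬ T.length = (T ++ (R ++ P)).length := by
    obtain ⟨r0, R', hRe⟩ := List.exists_cons_of_ne_nil hRne
    simp [hRe]
  rw [htw1, if_neg hif]
  have htw2 : (R ++ P).takeWhile (fun c => c == '_') = R := by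
    refine takeWhile_append_stop _ R P (fun c hc => by simp [hRall c hc]) ?_
    intro a tl h
    rcases hPh with h0 | ⟨_, h0⟩
    · rw [h0] at h; cases h
    · have : P.head? = some a := by rw [h]; rfl
      have ha : ¬ a = '_' := by
        intro he
        exact h0 (by rw [this, he])
      simp [ha]
  rw [List.drop_left, htw2]
  have hdrop2 : (T ++ (R ++ P)).drop (T.length + R.length) = P := by
    rw [show T ++ (R ++ P) = (T ++ R) ++ P by rw [List.append_assoc],
      show T.length + R.length = (T ++ R).length by simp]
    exact List.drop_left
  rw [hdrop2, List.take_left, replace_eq_filter]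
  rw [show ((T.length + R.length : Nat) : Int) - ((T.length : Nat) : Int)
      = ((R.length : Nat) : Int) by push_cast; ring]

theorem bamba_spec_aux (word : String) : bamba word = bamba_alt word := by
  by_cases hmem : '_' ∈ word.toList
  · -- the word contains an underscore
    have hmemrev : '_' ∈ word.toList.reverse := List.mem_reverse.mpr hmem
    have hTnous : '_' ∉ word.toList.reverse.takeWhile (fun c => !(c == '_')) := by
      intro hc
      have := List.mem_takeWhile_imp hc
      simp at this
    have hrestne : word.toList.reverse.dropWhile (fun c => !(c == '_')) ≠ [] := by
      intro h0
      have := List.dropWhile_eq_nil_iff.mp h0 _ hmemrev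
      simp at this
    have hrev : word.toList.reverse
        = word.toList.reverse.takeWhile (fun c => !(c == '_'))
          ++ word.toList.reverse.dropWhile (fun c => !(c == '_')) :=
      (List.takeWhile_append_dropWhile).symm
    have hrest : word.toList.reverse.dropWhile (fun c => !(c == '_'))
        = (word.toList.reverse.dropWhile (fun c => !(c == '_'))).takeWhile (fun c => c == '_')
          ++ (word.toList.reverse.dropWhile (fun c => !(c == '_'))).dropWhile (fun c => c == '_') :=
      (List.takeWhile_append_dropWhile).symm
    have hheadrest : (word.toList.reverse.dropWhile (fun c => !(c == '_'))).head hrestne = '_' := by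
      have := List.head_dropWhile_not (fun c => !(c == '_')) hrestne
      simpa using this
    obtain ⟨restTl, hrestEq⟩ : ∃ tl, word.toList.reverse.dropWhile (fun c => !(c == '_'))
        = '_' :: tl := by
      obtain ⟨a, tl, h1⟩ := List.exists_cons_of_ne_nil hrestne
      refine ⟨tl, ?_⟩
      have hasome : (word.toList.reverse.dropWhile (fun c => !(c == '_'))).head? = some a := by
        rw [h1]; rfl
      have hbsome := List.head?_eq_some_head hrestne
      have ha : a = '_' := by
        rw [hbsome] at hasome
        exact (Option.some.inj hasome).symm.trans hheadrest
      rw [h1, ha]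
    have hRne : (word.toList.reverse.dropWhile (fun c => !(c == '_'))).takeWhile
        (fun c => c == '_') ≠ [] := by
      rw [hrestEq, List.takeWhile_cons_of_pos (by simp)]
      simp
    have hRall : ∀ c ∈ (word.toList.reverse.dropWhile (fun c => !(c == '_'))).takeWhile
        (fun c => c == '_'), c = '_' := by
      intro c hc
      have := List.mem_takeWhile_imp hc
      simpa using this
    have hPh : (word.toList.reverse.dropWhile (fun c => !(c == '_'))).dropWhile
        (fun c => c == '_') = []
        ∨ ((word.toList.reverse.dropWhile (fun c => !(c == '_'))).dropWhile
            (fun c => c == '_') ≠ []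
          ∧ ((word.toList.reverse.dropWhile (fun c => !(c == '_'))).dropWhile
              (fun c => c == '_')).head? ≠ some '_') := by
      by_cases hP : (word.toList.reverse.dropWhile (fun c => !(c == '_'))).dropWhile
          (fun c => c == '_') = []
      · exact Or.inl hP
      · refine Or.inr ⟨hP, ?_⟩
        have h1 := List.head_dropWhile_not (fun c => c == '_') hP
        rw [List.head?_eq_some_head hP]
        simp only [beq_eq_false_iff_ne] at h1
        simp [h1]
    have hsplit : word.toList.reverse
        = word.toList.reverse.takeWhile (fun c => !(c == '_'))
          ++ (((word.toList.reverse.dropWhile (fun c => !(c == '_'))).takeWhile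
                (fun c => c == '_'))
            ++ ((word.toList.reverse.dropWhile (fun c => !(c == '_'))).dropWhile
                (fun c => c == '_'))) := by
      rw [← hrest]
      exact hrev
    exact both_eq word _ _ _ hsplit hTnous hRne hRall hPh
  · -- no underscore: A returns the word unchanged, B takes the then branch
    simp only [bamba, bamba_alt]
    rw [spanLen_eq_takeWhile]
    have hall : ∀ c ∈ word.toList.reverse, (fun c => !(c == '_')) c = true := by
      intro c hc
      simp only [Bool.not_eq_eq_eq_not, Bool.not_true, beq_eq_false_iff_ne]
      intro h
      exact hmem (List.mem_reverse.mp (h ▸ hc))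
    rw [if_pos (by rw [List.takeWhile_eq_self_iff.mpr hall])]
    rw [go_no_us word.toList word.toList hmem, replace_eq_filter]
    rw [List.filter_eq_self.mpr (by
      intro a ha
      simp only [Bool.not_eq_eq_eq_not, Bool.not_true, beq_eq_false_iff_ne]
      intro h
      exact hmem (h ▸ ha))]
    exact String.ofList_toList

-- ===== VERDICT (by name: the statement is the Claim_ definition above) =====
theorem bamba_spec : Claim_equal_bamba := by
  intro word _
  unfold Spec_bamba
  exact bamba_spec_aux word
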